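-- pv_equiv track=rewrite | github.com/PinkDraconian/CTF | WhiteHat Grand Prix 06 Quals/Programming 01/solve.py | all_possible_triangles
-- ===== SOURCE A (Python) =====
-- def all_possible_triangles(n):
-- 	""" Calculates the amount of possible triangles without looping through all combinations"""
-- 	count = 0
-- 	adder = 1
-- 	prev = 0
-- 	switch = 2
-- 	for i in range(4, n + 1):
-- 		prev += adder
-- 		count += prev
-- 		switch -= 1
-- 		if switch <= 0:
-- 			switch = 2
-- 			adder += 1
-- 	return count
-- ===== SOURCE B (Python) =====
-- def all_possible_triangles(n):
-- 	""" Calculates the amount of possible triangles without looping through all combinations"""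
-- 	if n < 4:
-- 		return 0
-- 	m = n - 2
-- 	return m * (m + 2) * (2 * m - 1) // 24
-- ===== Notes on version B (the rewrite author's own statement) =====
-- stated objective: faster
-- what changed: Replaced the O(n) accumulating loop by the closed-form polynomial floor(m*(m+2)*(2m-1)/24) with m = n-2 (0 for n < 4).
import Mathlib
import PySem

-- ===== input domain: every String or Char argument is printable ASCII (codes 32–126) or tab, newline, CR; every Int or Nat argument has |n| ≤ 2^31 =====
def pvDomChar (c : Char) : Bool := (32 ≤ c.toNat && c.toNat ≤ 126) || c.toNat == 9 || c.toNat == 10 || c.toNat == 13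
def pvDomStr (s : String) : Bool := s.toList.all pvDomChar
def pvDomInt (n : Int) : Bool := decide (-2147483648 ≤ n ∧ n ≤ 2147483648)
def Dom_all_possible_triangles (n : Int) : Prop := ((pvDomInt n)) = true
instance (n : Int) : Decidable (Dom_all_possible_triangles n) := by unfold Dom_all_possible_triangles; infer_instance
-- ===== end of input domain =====

-- B replaces A's O(n) accumulating loop by the closed-form polynomial floor(m(m+2)(2m-1)/24), m = n-2 (faster, asymptotic change).

-- ===== PORT A =====
-- loop body of A: state (count, adder, prev, switch)
def aptStep (st : Int × Int × Int × Int) (_i : Int) : Int × Int × Int × Int :=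
  match st with
  | (count, adder, prev, switch) =>
    let prev := prev + adder
    let count := count + prev
    let switch := switch - 1
    if switch ≤ 0 then (count, adder + 1, prev, 2) else (count, adder, prev, switch)

def all_possible_triangles (n : Int) : Int :=
  ((PySem.List.pyRange 4 (n + 1) 1).foldl aptStep (0, 1, 0, 2)).1

-- ===== PORT B =====
def all_possible_triangles_alt (n : Int) : Int :=
  if n < 4 then 0
  else
    let m := n - 2
    PySem.Int.floordiv (m * (m + 2) * (2 * m - 1)) 24

-- ===== PRECONDITION & SPEC =====
def Spec_all_possible_triangles (n : Int) (out : Int) : Prop := out = all_possible_triangles_alt n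
instance (n : Int) (out : Int) : Decidable (Spec_all_possible_triangles n out) := by unfold Spec_all_possible_triangles; infer_instance

-- ===== CLAIM (what is proved, stated in full; the proofs are below) =====
def Claim_equal_all_possible_triangles : Prop := ∀ (n : Int), Dom_all_possible_triangles n → Spec_all_possible_triangles n (all_possible_triangles n)

-- ===== LEMMAS AND PROOFS =====

-- Invariant of A's loop after processing i = 4 .. n (for n ≥ 3).
def aptInv (n : Int) (st : Int × Int × Int × Int) : Prop :=
  match st with
  | (c, a, p, s) =>
    (s = 1 ∧ 2 * a = n - 2 ∧ 4 * p = (n - 2) ^ 2 ∧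
       24 * c = (n - 2) * (n - 1) * (2 * n - 3) - 3 * (n - 2)) ∨
    (s = 2 ∧ 2 * a = n - 1 ∧ 4 * p = (n - 2) ^ 2 - 1 ∧
       24 * c = (n - 2) * (n - 1) * (2 * n - 3) - 3 * (n - 1))

theorem aptInv_holds (n : Int) (hn : 3 ≤ n) :
    aptInv n ((PySem.List.pyRange 4 (n + 1) 1).foldl aptStep (0, 1, 0, 2)) := by
  induction n, hn using Int.le_induction with
  | base =>
    rw [PySem.List.pyRange_one_eq_nil (by norm_num)]
    simp [aptInv]
  | succ n hn ih =>
    rw [show n + 1 + 1 = (n + 1) + 1 by ring,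
        PySem.List.pyRange_one_succ_right (by omega), List.foldl_append]
    set st := (PySem.List.pyRange 4 (n + 1) 1).foldl aptStep (0, 1, 0, 2) with hst
    obtain ⟨c, a, p, s⟩ := st
    simp only [List.foldl_cons, List.foldl_nil]
    rcases ih with ⟨hs, h2, h4, h24⟩ | ⟨hs, h2, h4, h24⟩
    · -- s = 1 : switch resets, adder increments
      subst hs
      simp only [aptStep, aptInv]
      norm_num
      refine ⟨by linarith, by linear_combination h4 + 2 * h2, ?_⟩
      linear_combination h24 + 6 * h4 + 12 * h2
    · -- s = 2 : switch decrements to 1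
      subst hs
      simp only [aptStep, aptInv]
      norm_num
      refine ⟨by linarith, by linear_combination h4 + 2 * h2, ?_⟩
      linear_combination h24 + 6 * h4 + 12 * h2

-- ===== VERDICT (by name: the statement is the Claim_ definition above) =====
theorem all_possible_triangles_spec : Claim_equal_all_possible_triangles := by
  intro n _
  unfold Spec_all_possible_triangles all_possible_triangles all_possible_triangles_alt
  by_cases hn : n < 4
  · rw [PySem.List.pyRange_one_eq_nil (by omega)]
    simp [hn]
  · have h := aptInv_holds n (by omega)
    set st := (PySem.List.pyRange 4 (n + 1) 1).foldl aptStep (0, 1, 0, 2) with hst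
    obtain ⟨c, a, p, s⟩ := st
    simp only [hn, if_false]
    rw [PySem.Int.floordiv_eq_ediv_of_pos (by norm_num)]
    rcases h with ⟨_, h2, h4, h24⟩ | ⟨_, h2, h4, h24⟩
    · have hnum : (n - 2) * (n - 2 + 2) * (2 * (n - 2) - 1) = 24 * c := by
        linear_combination -h24
      simp only [hnum]
      omega
    · have hnum : (n - 2) * (n - 2 + 2) * (2 * (n - 2) - 1) = 24 * c + 3 := by
        linear_combination -h24
      simp only [hnum]
      omega
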